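-- pv_equiv track=rewrite | github.com/d-e-v1234/Handrabble--A-Scrabble-Like-Word-Game | Handrabble.py | compare_with_wildcard
-- ===== SOURCE A (Python) =====
-- def compare_with_wildcard(wild_word, match_word):
--     if(len(wild_word) != len(match_word)):
--         return False
--     for wild_letter, match_letter in zip(wild_word, match_word):
--         if(wild_letter == "*" and match_letter not in "aeiou"):
--             return False
--         elif(wild_letter != match_letter):
--             return False
--
--     return True
-- ===== SOURCE B (Python) =====
-- def compare_with_wildcard(wild_word, match_word):
--     return len(wild_word) == len(match_word) and all(
--         (m in "aeiou") if w == "*" else w == m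
--         for w, m in zip(wild_word, match_word))
-- ===== Notes on version B (the rewrite author's own statement) =====
-- stated objective: simpler
-- what changed: Replaces the early-return loop (whose elif also rejects every successful wildcard match) with a single boolean expression: length check plus all() over a conditional per-position predicate, giving the intended '*-matches-a-vowel' behaviour.
-- intended difference: On equal-length inputs where wild_word contains at least one '*', every '*' aligns with a vowel and every other position matches exactly, A returns False (its elif compares '*' against the matched letter and rejects), while B returns True, the intended wildcard-vowel match. — e.g. on compare_with_wildcard("c*t", "cat"): A returns false, B returns true
import Mathlib
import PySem

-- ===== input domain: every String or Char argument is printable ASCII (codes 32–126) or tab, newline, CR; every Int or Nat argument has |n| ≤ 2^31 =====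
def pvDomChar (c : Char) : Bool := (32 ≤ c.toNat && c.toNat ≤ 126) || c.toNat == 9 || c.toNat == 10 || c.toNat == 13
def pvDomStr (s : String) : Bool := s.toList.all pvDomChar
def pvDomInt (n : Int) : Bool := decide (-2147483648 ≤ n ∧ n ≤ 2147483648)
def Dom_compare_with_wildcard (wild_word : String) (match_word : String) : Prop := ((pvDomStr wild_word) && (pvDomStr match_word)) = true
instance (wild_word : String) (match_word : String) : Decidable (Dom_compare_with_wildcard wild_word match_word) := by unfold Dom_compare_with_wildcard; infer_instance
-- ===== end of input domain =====

-- B replaces A's early-return loop by one boolean expression (length check && all over a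
-- per-position predicate), and B gives the intended wildcard-vowel behaviour where A's elif
-- wrongly rejects (see D_ below).

-- ===== PORT A =====
-- the for-loop with early returns, as structural recursion over the zipped character pairs
def pvLoopA : List (Char × Char) → Bool
  | [] => true
  | (w, m) :: rest =>
    if w = '*' ∧ ¬ ("aeiou".toList.contains m) then false
    else if w ≠ m then false
    else pvLoopA rest

def compare_with_wildcard (wild_word : String) (match_word : String) : Bool :=
  if wild_word.toList.length ≠ match_word.toList.length then false
  else pvLoopA (wild_word.toList.zip match_word.toList)

-- ===== PORT B =====
-- '(m in "aeiou") if w == "*" else w == m'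
def pvGoodPair (p : Char × Char) : Bool :=
  if p.1 = '*' then "aeiou".toList.contains p.2 else p.1 == p.2

def compare_with_wildcard_alt (wild_word : String) (match_word : String) : Bool :=
  decide (wild_word.toList.length = match_word.toList.length)
    && (wild_word.toList.zip match_word.toList).all pvGoodPair

-- ===== PRECONDITION & SPEC =====
-- On equal-length inputs where wild_word contains a '*', every '*' aligns with a vowel and
-- every other position matches exactly, A returns False (its elif compares '*' against the
-- matched letter), while B returns True, the intended wildcard-vowel match.
def D_compare_with_wildcard (wild_word : String) (match_word : String) : Prop :=
  wild_word.toList.length = match_word.toList.length ∧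
  '*' ∈ wild_word.toList ∧
  ∀ p ∈ wild_word.toList.zip match_word.toList,
    (p.1 = '*' → p.2 ∈ ['a', 'e', 'i', 'o', 'u']) ∧ (p.1 ≠ '*' → p.1 = p.2)
instance (wild_word : String) (match_word : String) : Decidable (D_compare_with_wildcard wild_word match_word) := by
  unfold D_compare_with_wildcard; infer_instance

def Spec_compare_with_wildcard (wild_word : String) (match_word : String) (out : Bool) : Prop :=
  ¬ D_compare_with_wildcard wild_word match_word → out = compare_with_wildcard_alt wild_word match_word
instance (wild_word : String) (match_word : String) (out : Bool) : Decidable (Spec_compare_with_wildcard wild_word match_word out) := by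
  unfold Spec_compare_with_wildcard; infer_instance

def pvDiffWitness_compare_with_wildcard : String × String := ("c*t", "cat")
def pvDiffWitnessOut_compare_with_wildcard : Bool × Bool := (false, true)

-- ===== CLAIM (what is proved, stated in full; the proofs are below) =====
def Claim_unchanged_compare_with_wildcard : Prop := ∀ (wild_word : String) (match_word : String), Dom_compare_with_wildcard wild_word match_word → Spec_compare_with_wildcard wild_word match_word (compare_with_wildcard wild_word match_word)
def Claim_changed_compare_with_wildcard : Prop := Dom_compare_with_wildcard (pvDiffWitness_compare_with_wildcard.1) (pvDiffWitness_compare_with_wildcard.2) ∧ D_compare_with_wildcard (pvDiffWitness_compare_with_wildcard.1) (pvDiffWitness_compare_with_wildcard.2) ∧ compare_with_wildcard (pvDiffWitness_compare_with_wildcard.1) (pvDiffWitness_compare_with_wildcard.2) = pvDiffWitnessOut_compare_with_wildcard.1 ∧ compare_with_wildcard_alt (pvDiffWitness_compare_with_wildcard.1) (pvDiffWitness_compare_with_wildcard.2) = pvDiffWitnessOut_compare_with_wildcard.2 ∧ pvDiffWitnessOut_compare_with_wildcard.1 ≠ pvDiffWitnessOut_compare_with_wildcard.2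
def Claim_exact_compare_with_wildcard : Prop := ∀ (wild_word : String) (match_word : String), Dom_compare_with_wildcard wild_word match_word → D_compare_with_wildcard wild_word match_word → compare_with_wildcard wild_word match_word ≠ compare_with_wildcard_alt wild_word match_word

-- ===== LEMMAS AND PROOFS =====

-- A's loop accepts a pair iff the characters are equal and the wild character is not '*'
lemma pvLoopA_eq_all (ps : List (Char × Char)) :
    pvLoopA ps = ps.all (fun p => p.1 == p.2 && !(p.1 == '*')) := by
  induction ps with
  | nil => rfl
  | cons p rest ih =>
    obtain ⟨w, m⟩ := p
    simp only [pvLoopA, List.all_cons]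
    by_cases h1 : w = '*' ∧ ¬ ("aeiou".toList.contains m)
    · simp only [if_pos h1]
      obtain ⟨hw, hm⟩ := h1
      subst hw
      simp
    · simp only [if_neg h1]
      by_cases h2 : w ≠ m
      · simp [Ne.symm, fun h => h2 h]
      · rw [not_not] at h2
        subst h2
        rw [not_and_or, not_not] at h1
        by_cases hs : w = '*'
        · subst hs
          rcases h1 with h | h
          · exact absurd rfl h
          · simp at h
        · simp [hs, ih]

lemma pvGoodPair_iff (p : Char × Char) :
    pvGoodPair p = true ↔
      ((p.1 = '*' → p.2 ∈ ['a', 'e', 'i', 'o', 'u']) ∧ (p.1 ≠ '*' → p.1 = p.2)) := by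
  obtain ⟨w, m⟩ := p
  by_cases hs : w = '*'
  · subst hs
    simp [pvGoodPair]
  · simp [pvGoodPair, hs]

theorem compare_with_wildcard_spec : Claim_unchanged_compare_with_wildcard := by
  intro wild_word match_word _ hND
  unfold compare_with_wildcard compare_with_wildcard_alt
  set wl := wild_word.toList with hwl
  set ml := match_word.toList with hml
  by_cases hlen : wl.length = ml.length
  · simp only [hlen, ne_eq, not_true_eq_false, if_false, decide_true, Bool.true_and]
    rw [pvLoopA_eq_all]
    by_cases hall : (wl.zip ml).all pvGoodPair = true
    · -- all positions good; since ¬D_, no '*' in wl, so A's predicate also holds everywhere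
      have hstar : ¬ ('*' ∈ wl) := by
        intro hmem
        apply hND
        refine ⟨hlen, hmem, ?_⟩
        intro p hp
        exact (pvGoodPair_iff p).mp (List.all_eq_true.mp hall p hp)
      rw [hall]
      apply List.all_eq_true.mpr
      intro p hp
      have hg := (pvGoodPair_iff p).mp (List.all_eq_true.mp hall p hp)
      have hp1 : p.1 ∈ wl := (List.of_mem_zip hp).1
      have hns : p.1 ≠ '*' := fun h => hstar (h ▸ hp1)
      have := hg.2 hns
      simp only [Bool.and_eq_true, beq_iff_eq, Bool.not_eq_true', beq_eq_false_iff_ne]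
      exact ⟨this, hns⟩
    · -- some bad pair: both sides reject
      rw [eq_false_of_ne_true hall]
      apply Bool.eq_false_iff.mpr
      intro hA
      apply hall
      apply List.all_eq_true.mpr
      intro p hp
      have := List.all_eq_true.mp hA p hp
      simp only [Bool.and_eq_true, beq_iff_eq, Bool.not_eq_true', beq_eq_false_iff_ne, ne_eq] at this
      apply (pvGoodPair_iff p).mpr
      exact ⟨fun h => absurd h this.2, fun _ => this.1⟩
  · simp [hlen]

theorem compare_with_wildcard_changed : Claim_changed_compare_with_wildcard := by
  unfold Claim_changed_compare_with_wildcard; decide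

theorem compare_with_wildcard_tight : Claim_exact_compare_with_wildcard := by
  intro wild_word match_word _ hD
  obtain ⟨hlen, hmem, hgood⟩ := hD
  unfold compare_with_wildcard compare_with_wildcard_alt
  simp only [hlen, ne_eq, not_true_eq_false, if_false, decide_true, Bool.true_and]
  -- B accepts
  have hB : (wild_word.toList.zip match_word.toList).all pvGoodPair = true := by
    apply List.all_eq_true.mpr
    intro p hp
    exact (pvGoodPair_iff p).mpr (hgood p hp)
  -- A rejects: the '*' position fails A's predicate
  have hA : pvLoopA (wild_word.toList.zip match_word.toList) = false := by
    rw [pvLoopA_eq_all]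
    apply Bool.eq_false_iff.mpr
    intro hall
    have hfst : (wild_word.toList.zip match_word.toList).map Prod.fst = wild_word.toList :=
      List.map_fst_zip (le_of_eq hlen)
    rw [← hfst] at hmem
    obtain ⟨p, hp, hps⟩ := List.mem_map.mp hmem
    have := List.all_eq_true.mp hall p hp
    simp only [Bool.and_eq_true, beq_iff_eq, Bool.not_eq_true', beq_eq_false_iff_ne, ne_eq] at this
    exact this.2 hps
  rw [hA, hB]
  decide
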